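-- pv_equiv track=rewrite | github.com/jayasurya-n/Contests | CodeChef_Contest/START_140/yoga_class.py | yogaMoney
-- ===== SOURCE A (Python) =====
-- def yogaMoney(n,x,y):
--     if(n==0):return 0
--     if(n==1):return x
--
--     dp = [0]*(n+1)
--     dp[1] = x
--
--     for i in range(2,n+1):
--         dp[i] = max(dp[i-1]+x, dp[i-2]+y)
--     return dp[n]
-- ===== SOURCE B (Python) =====
-- def yogaMoney(n, x, y):
--     # Closed form: taking k sessions of length 2 and n-2k of length 1 earns
--     # n*x + k*(y-2x); a linear function of k is maximised at an endpoint,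
--     # so the optimum is k=0 or k=n//2.
--     return n * x + max(0, (n // 2) * (y - 2 * x))
-- ===== Notes on version B (the rewrite author's own statement) =====
-- stated objective: faster
-- what changed: Replaced the O(n) DP over dp[0..n] by the closed form n*x + max(0, (n//2)*(y-2x)), since the DP maximises a linear function of the number of 2-steps, attained at an endpoint.
import Mathlib
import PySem

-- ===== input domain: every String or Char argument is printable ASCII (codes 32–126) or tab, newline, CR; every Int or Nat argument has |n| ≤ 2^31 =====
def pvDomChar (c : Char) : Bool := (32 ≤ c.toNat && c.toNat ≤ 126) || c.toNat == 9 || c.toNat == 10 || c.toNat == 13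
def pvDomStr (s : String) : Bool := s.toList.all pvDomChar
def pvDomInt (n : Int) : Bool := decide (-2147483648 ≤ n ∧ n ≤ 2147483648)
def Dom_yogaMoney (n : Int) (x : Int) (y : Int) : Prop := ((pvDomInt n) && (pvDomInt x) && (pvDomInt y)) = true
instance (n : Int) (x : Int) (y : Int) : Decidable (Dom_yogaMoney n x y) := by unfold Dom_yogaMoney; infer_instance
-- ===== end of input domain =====

-- B replaces A's O(n) DP by the O(1) closed form n*x + max(0, (n//2)*(y-2x)).


-- ===== PORT A =====
-- The Python list dp is ported as an Array for O(1) element update; same loop, same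
-- intermediate values. getD/setIfInBounds are exact here: every index this code uses
-- (1, i-2, i-1, i, n with 2 ≤ i ≤ n) is nonnegative and in range whenever n ≥ 2,
-- and the n = 0 / n = 1 branches return before dp exists.
def yogaMoney (n : Int) (x : Int) (y : Int) : Int :=
  if n = 0 then 0
  else if n = 1 then x
  else
    let dp := Array.replicate (n + 1).toNat (0 : Int)   -- dp = [0]*(n+1)
    let dp := dp.setIfInBounds 1 x                      -- dp[1] = x
    let dp := (PySem.List.pyRange 2 (n + 1) 1).foldl    -- for i in range(2, n+1):
      (fun dp i => dp.setIfInBounds i.toNat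
        (max (dp.getD (i - 1).toNat 0 + x) (dp.getD (i - 2).toNat 0 + y))) dp
    dp.getD n.toNat 0                                   -- return dp[n]

-- ===== PORT B =====
def yogaMoney_alt (n : Int) (x : Int) (y : Int) : Int :=
  n * x + max 0 (PySem.Int.floordiv n 2 * (y - 2 * x))

-- ===== PRECONDITION & SPEC =====
-- A raises IndexError for n < 0 (dp is the empty list there); Pre_ admits exactly the n on which A returns.
def Pre_yogaMoney (n : Int) (x : Int) (y : Int) : Prop := 0 ≤ n
instance (n : Int) (x : Int) (y : Int) : Decidable (Pre_yogaMoney n x y) := by unfold Pre_yogaMoney; infer_instance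
def pvWitness_yogaMoney : Int × Int × Int := (5, 3, 7)

def Spec_yogaMoney (n : Int) (x : Int) (y : Int) (out : Int) : Prop := out = yogaMoney_alt n x y
instance (n : Int) (x : Int) (y : Int) (out : Int) : Decidable (Spec_yogaMoney n x y out) := by unfold Spec_yogaMoney; infer_instance

-- ===== CLAIM (what is proved, stated in full; the proofs are below) =====
def Claim_equal_yogaMoney : Prop := ∀ (n : Int) (x : Int) (y : Int), Dom_yogaMoney n x y → Pre_yogaMoney n x y → Spec_yogaMoney n x y (yogaMoney n x y)

-- ===== LEMMAS AND PROOFS =====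

-- The DP value of A at index i, in closed form (= yogaMoney_alt x y applied at i).
def fval (x y i : Int) : Int := i * x + max 0 (PySem.Int.floordiv i 2 * (y - 2 * x))

-- the loop body of A's port
def stepA (x y : Int) (dp : Array Int) (i : Int) : Array Int :=
  dp.setIfInBounds i.toNat
    (max (dp.getD (i - 1).toNat 0 + x) (dp.getD (i - 2).toNat 0 + y))

lemma fval_rec (x y i : Int) (hi : 2 ≤ i) :
    fval x y i = max (fval x y (i - 1) + x) (fval x y (i - 2) + y) := by
  unfold fval
  rw [PySem.Int.floordiv_eq_ediv_of_pos (a := i) (by omega),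
      PySem.Int.floordiv_eq_ediv_of_pos (a := i - 1) (by omega),
      PySem.Int.floordiv_eq_ediv_of_pos (a := i - 2) (by omega)]
  set d := y - 2 * x with hd
  set m := i / 2 with hm
  have hm1 : 1 ≤ m := by omega
  have e2 : (i - 2) / 2 = m - 1 := by omega
  have hsplit : (i - 1) / 2 = m - 1 ∨ (i - 1) / 2 = m := by omega
  have hmd : m * d = (m - 1) * d + d := by ring
  have r1 : (i - 1) * x = i * x - x := by ring
  have r2 : (i - 2) * x = i * x - 2 * x := by ring
  rcases hsplit with e1 | e1 <;> rw [e1, e2, r1, r2, hmd] <;>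
    rcases le_total 0 d with hdp | hdn
  · have hp : 0 ≤ (m - 1) * d := mul_nonneg (by omega) hdp
    generalize (m - 1) * d = p at hp ⊢
    simp only [max_def]; split_ifs <;> omega
  · have hp : (m - 1) * d ≤ 0 := mul_nonpos_of_nonneg_of_nonpos (by omega) hdn
    generalize (m - 1) * d = p at hp ⊢
    simp only [max_def]; split_ifs <;> omega
  · have hp : 0 ≤ (m - 1) * d := mul_nonneg (by omega) hdp
    generalize (m - 1) * d = p at hp ⊢
    simp only [max_def]; split_ifs <;> omega
  · have hp : (m - 1) * d ≤ 0 := mul_nonpos_of_nonneg_of_nonpos (by omega) hdn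
    generalize (m - 1) * d = p at hp ⊢
    simp only [max_def]; split_ifs <;> omega

-- Loop invariant: after processing range(2, m), entries 0..m-1 hold the closed-form values.
lemma loop_inv (x y : Int) (N : Nat) (dp0 : Array Int)
    (hlen : dp0.size = N)
    (h0 : ∀ j : Nat, j < 2 → dp0.getD j 0 = fval x y j) :
    ∀ (m : Nat), 2 ≤ m → m ≤ N →
      ((PySem.List.pyRange 2 (m : Int) 1).foldl (stepA x y) dp0).size = N ∧
      ∀ j : Nat, j < m →
        ((PySem.List.pyRange 2 (m : Int) 1).foldl (stepA x y) dp0).getD j 0 = fval x y j := by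
  intro m
  induction m with
  | zero => omega
  | succ m ih =>
    intro h2 hN
    rcases Nat.lt_or_ge m 2 with hm2 | hm2
    · -- m + 1 = 2 : empty range
      have hm : m = 1 := by omega
      subst hm
      rw [show ((2 : Nat) : Int) = 2 by norm_num, PySem.List.pyRange_one_eq_nil (by omega)]
      exact ⟨hlen, fun j hj => h0 j hj⟩
    · obtain ⟨ihlen, ihval⟩ := ih hm2 (by omega)
      have hrange : PySem.List.pyRange 2 ((m : Nat) + 1 : Int) 1
          = PySem.List.pyRange 2 (m : Int) 1 ++ [(m : Int)] :=
        PySem.List.pyRange_one_succ_right (by omega)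
      have hcast : (((m + 1 : Nat)) : Int) = ((m : Nat) : Int) + 1 := by push_cast; ring
      rw [hcast, hrange, List.foldl_append]
      set L := (PySem.List.pyRange 2 (m : Int) 1).foldl (stepA x y) dp0 with hL
      have hmlt : m < L.size := by omega
      have hstep : stepA x y L (m : Int) = L.setIfInBounds m (fval x y m) := by
        unfold stepA
        rw [show ((m : Int) - 1).toNat = m - 1 by omega,
            show ((m : Int) - 2).toNat = m - 2 by omega,
            show ((m : Int)).toNat = m by omega,
            ihval (m - 1) (by omega), ihval (m - 2) (by omega),
            show ((m - 1 : Nat) : Int) = (m : Int) - 1 by omega,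
            show ((m - 2 : Nat) : Int) = (m : Int) - 2 by omega,
            ← fval_rec x y (m : Int) (by exact_mod_cast hm2)]
      rw [List.foldl_cons, List.foldl_nil, hstep]
      refine ⟨by simp [ihlen], ?_⟩
      intro j hj
      rw [Array.getD_eq_getD_getElem?, Array.getElem?_setIfInBounds]
      rcases Nat.lt_or_ge j m with hjm | hjm
      · rw [if_neg (by omega), ← Array.getD_eq_getD_getElem?]
        exact ihval j hjm
      · have hj' : j = m := by omega
        subst hj'
        rw [if_pos rfl, if_pos hmlt]
        rfl

lemma yogaMoney_eq_fval (n x y : Int) (hn : 0 ≤ n) : yogaMoney n x y = fval x y n := by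
  unfold yogaMoney
  by_cases h0 : n = 0
  · subst h0
    simp [fval]
  · by_cases h1 : n = 1
    · subst h1
      simp [h0, fval]
    · simp only [h0, h1, if_false]
      have hn2 : 2 ≤ n := by omega
      set dp0 := (Array.replicate (n + 1).toNat (0 : Int)).setIfInBounds 1 x with hdp0
      have hlen : dp0.size = (n + 1).toNat := by
        rw [hdp0, Array.size_setIfInBounds, Array.size_replicate]
      have h0' : ∀ j : Nat, j < 2 → dp0.getD j 0 = fval x y j := by
        intro j hj
        rw [hdp0, Array.getD_eq_getD_getElem?, Array.getElem?_setIfInBounds]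
        interval_cases j
        · rw [if_neg (by omega), Array.getElem?_replicate, if_pos (by omega)]
          simp [fval]
        · rw [if_pos rfl, if_pos (by rw [Array.size_replicate]; omega)]
          simp [fval]
      obtain ⟨-, hval⟩ := loop_inv x y (n + 1).toNat dp0 hlen h0' (n + 1).toNat (by omega) le_rfl
      have hcast : (((n + 1).toNat : Nat) : Int) = n + 1 := by omega
      rw [hcast] at hval
      have := hval n.toNat (by omega)
      rw [show ((n.toNat : Nat) : Int) = n by omega] at this
      rw [← this]
      rfl

lemma alt_eq_fval (n x y : Int) : yogaMoney_alt n x y = fval x y n := rfl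

-- ===== VERDICT (by name: the statement is the Claim_ definition above) =====
theorem yogaMoney_spec : Claim_equal_yogaMoney := by
  intro n x y _ hpre
  unfold Spec_yogaMoney
  rw [yogaMoney_eq_fval n x y hpre, alt_eq_fval]
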